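-- pv_equiv track=rewrite | github.com/Wasabules/picoscope-libusb | python/picoscope_libusb_full.py | _get_timebase_chan_bytes
-- ===== SOURCE A (Python) =====
-- from typing import Optional, Dict, List, Tuple, Callable
--
-- def _get_timebase_chan_bytes(timebase: int) -> Tuple[int, int]:
--     """Return the channel config bytes for the 85 08 93 sub-command.
--
--     These bytes vary per timebase. Values observed from SDK USB trace.
--     The buffer sub-command (85 08 89) uses 2^timebase, computed inline.
--     """
--     # Observed from SDK trace: channel config bytes per timebase
--     _TB_CHAN = {
--         0: (0x27, 0x2f),
--         1: (0x13, 0xa7),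
--         2: (0x09, 0xe3),
--         3: (0x05, 0x01),
--         4: (0x02, 0x90),  # Interpolated (midpoint of tb=3 and tb=5)
--         5: (0x01, 0x57),
--         6: (0x00, 0xbb),  # Interpolated
--         7: (0x00, 0x6d),  # Interpolated
--         8: (0x00, 0x46),  # Interpolated
--         9: (0x00, 0x33),  # Interpolated
--         10: (0x00, 0x28),
--     }
--     if timebase in _TB_CHAN:
--         return _TB_CHAN[timebase]
--     # For higher timebases, approximate by halving from nearest known value
--     if timebase > 10:
--         val = 40  # tb=10 value
--         for _ in range(timebase - 10):
--             val = max(val // 2, 1)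
--         return ((val >> 8) & 0xFF, val & 0xFF)
--     return (0x01, 0x57)  # Default to tb=5 values
-- ===== SOURCE B (Python) =====
-- def _get_timebase_chan_bytes(timebase: int):
--     """Single flat table of combined 16-bit words + one shift; the two bytes are
--     split from the word by divmod at the end, for every branch uniformly."""
--     _TB_WORDS = [0x272f, 0x13a7, 0x09e3, 0x0501, 0x0290, 0x0157,
--                  0x00bb, 0x006d, 0x0046, 0x0033, 0x0028]
--     if 0 <= timebase <= 10:
--         word = _TB_WORDS[timebase]
--     elif timebase > 10:
--         word = max(40 >> (timebase - 10), 1)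
--     else:
--         word = 0x0157
--     hi, lo = divmod(word, 256)
--     return (hi, lo)
-- ===== Notes on version B (the rewrite author's own statement) =====
-- stated objective: faster
-- what changed: Replaces the dict of byte pairs plus O(timebase) halving loop by a flat table of combined 16-bit words and the closed form max(40 >> (timebase-10), 1), with one uniform divmod(word, 256) split producing the two bytes for every branch.
import Mathlib
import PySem

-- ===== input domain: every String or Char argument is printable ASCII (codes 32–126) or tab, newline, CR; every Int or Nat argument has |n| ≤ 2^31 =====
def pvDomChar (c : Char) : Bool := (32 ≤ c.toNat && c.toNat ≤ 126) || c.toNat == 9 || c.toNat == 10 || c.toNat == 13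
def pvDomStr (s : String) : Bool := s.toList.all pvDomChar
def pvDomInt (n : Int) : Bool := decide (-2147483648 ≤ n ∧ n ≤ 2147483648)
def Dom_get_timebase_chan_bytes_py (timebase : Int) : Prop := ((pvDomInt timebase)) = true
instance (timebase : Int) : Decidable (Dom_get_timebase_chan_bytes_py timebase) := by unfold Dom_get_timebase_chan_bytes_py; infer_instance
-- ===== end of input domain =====

-- B replaces the dict of byte pairs and the O(timebase) halving loop by one flat table of combined 16-bit words plus the closed form max(40 >> (timebase-10), 1), splitting the bytes uniformly with divmod(word, 256); objective: faster (measured).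


-- ===== PORT A =====
-- the dict literal _TB_CHAN
def pvTbChan : PySem.Dict Int (Int × Int) :=
  PySem.Dict.ofList [(0, (0x27, 0x2f)), (1, (0x13, 0xa7)), (2, (0x09, 0xe3)), (3, (0x05, 0x01)),
    (4, (0x02, 0x90)), (5, (0x01, 0x57)), (6, (0x00, 0xbb)), (7, (0x00, 0x6d)),
    (8, (0x00, 0x46)), (9, (0x00, 0x33)), (10, (0x00, 0x28))]

def get_timebase_chan_bytes_py (timebase : Int) : Int × Int :=
  match PySem.Dict.get? pvTbChan timebase with      -- 'timebase in _TB_CHAN' then '_TB_CHAN[timebase]'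
  | some v => v
  | none =>
    if timebase > 10 then
      -- for _ in range(timebase - 10): val = max(val // 2, 1)
      let val := (PySem.List.pyRange 0 (timebase - 10) 1).foldl
                   (fun v _ => max (PySem.Int.floordiv v 2) 1) 40
      (Int.land (val >>> (8 : Nat)) 0xFF, Int.land val 0xFF)   -- 'val >> 8 & 0xFF', 'val & 0xFF'
    else (0x01, 0x57)

-- ===== PORT B =====
-- _TB_WORDS: each entry is the combined 16-bit word hi*256 + lo
def pvTbWords : List Int :=
  [0x272f, 0x13a7, 0x09e3, 0x0501, 0x0290, 0x0157, 0x00bb, 0x006d, 0x0046, 0x0033, 0x0028]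

def get_timebase_chan_bytes_py_alt (timebase : Int) : Int × Int :=
  let word :=
    if 0 ≤ timebase ∧ timebase ≤ 10 then
      (PySem.List.pyGet? pvTbWords timebase).getD 0   -- _TB_WORDS[timebase]; index always in range here
    else if timebase > 10 then
      max ((40 : Int) >>> (timebase - 10).toNat) 1    -- max(40 >> (timebase-10), 1)
    else
      0x0157
  (PySem.Int.floordiv word 256, PySem.Int.mod word 256)   -- hi, lo = divmod(word, 256); divisor is the literal 256 ≠ 0, so divmod always returns

-- ===== PRECONDITION & SPEC =====
def Spec_get_timebase_chan_bytes_py (timebase : Int) (out : Int × Int) : Prop := out = get_timebase_chan_bytes_py_alt timebase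
instance (timebase : Int) (out : Int × Int) : Decidable (Spec_get_timebase_chan_bytes_py timebase out) := by unfold Spec_get_timebase_chan_bytes_py; infer_instance

-- ===== CLAIM (what is proved, stated in full; the proofs are below) =====
def Claim_equal_get_timebase_chan_bytes_py : Prop := ∀ (timebase : Int), Dom_get_timebase_chan_bytes_py timebase → Spec_get_timebase_chan_bytes_py timebase (get_timebase_chan_bytes_py timebase)

-- ===== LEMMAS AND PROOFS =====

-- a fold that ignores the list elements only depends on the length
theorem pv_foldl_const {α : Type} (g : Int → Int) :
    ∀ (l : List α) (v : Int), l.foldl (fun v _ => g v) v = g^[l.length] v := by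
  intro l
  induction l with
  | nil => intro v; rfl
  | cons x xs ih =>
      intro v
      simp [List.foldl_cons, ih, Function.iterate_succ_apply]

-- closed form of the halving loop: n steps of max(v // 2, 1) from v ≥ 1 is max(v >> n, 1)
theorem pv_iter_closed : ∀ (n : Nat) (v : Int), 1 ≤ v →
    (fun v => max (PySem.Int.floordiv v 2) 1)^[n] v = max (v >>> n) 1 := by
  intro n
  induction n with
  | zero =>
      intro v hv
      simp [Int.shiftRight_eq_div_pow]
      omega
  | succ n ih =>
      intro v hv
      rw [Function.iterate_succ_apply]
      have hstep : max (PySem.Int.floordiv v 2) 1 = max (v / 2) 1 := by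
        rw [PySem.Int.floordiv_eq_ediv_of_pos (by norm_num)]
      simp only [hstep]
      rw [ih (max (v / 2) 1) (le_max_right _ _)]
      rw [Int.shiftRight_eq_div_pow, Int.shiftRight_eq_div_pow]
      push_cast
      by_cases h2 : (2:Int) ≤ v
      · have hm : max (v / 2) 1 = v / 2 := by
          have : 1 ≤ v / 2 := by omega
          omega
        rw [hm, Int.ediv_ediv_of_nonneg (hy := by norm_num), ← pow_succ']
      · have hv1 : v = 1 := by omega
        subst hv1
        have hhalf : (1:Int) / 2 = 0 := by decide
        rw [hhalf]
        have hmax : max (0:Int) 1 = 1 := by norm_num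
        rw [hmax]
        have h1 : (1 : Int) / 2 ^ (n + 1) = 0 := by
          apply Int.ediv_eq_zero_of_lt (by norm_num)
          calc (1 : Int) < 2 ^ 1 := by norm_num
            _ ≤ 2 ^ (n + 1) := by
              apply pow_le_pow_right₀ (by norm_num) (by omega)
        rw [h1]
        rcases Nat.eq_zero_or_pos n with hn | hn
        · subst hn; decide
        · have hn0 : (1 : Int) / 2 ^ n = 0 := by
            apply Int.ediv_eq_zero_of_lt (by norm_num)
            calc (1 : Int) < 2 ^ 1 := by norm_num
              _ ≤ 2 ^ n := by
                apply pow_le_pow_right₀ (by norm_num) (by omega)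
          rw [hn0]

set_option maxHeartbeats 2000000 in
theorem pv_get?_none (timebase : Int) (hlo : timebase < 0 ∨ 10 < timebase) :
    PySem.Dict.get? pvTbChan timebase = none := by
  have h : pvTbChan = PySem.Dict.mk [(0, (0x27, 0x2f)), (1, (0x13, 0xa7)), (2, (0x09, 0xe3)), (3, (0x05, 0x01)),
    (4, (0x02, 0x90)), (5, (0x01, 0x57)), (6, (0x00, 0xbb)), (7, (0x00, 0x6d)),
    (8, (0x00, 0x46)), (9, (0x00, 0x33)), (10, (0x00, 0x28))] := by rfl
  rw [h]
  simp only [PySem.Dict.get?_mk_cons, beq_iff_eq]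
  split_ifs <;> first | rfl | omega

-- A's byte-masking of a small nonnegative word equals B's divmod split
theorem pv_split_small : ∀ (v : Int), 0 ≤ v → v ≤ 40 →
    (Int.land (v >>> (8 : Nat)) 0xFF, Int.land v 0xFF) =
    (PySem.Int.floordiv v 256, PySem.Int.mod v 256) := by
  intro v h0 h40
  interval_cases v <;> decide

-- ===== VERDICT (by name: the statement is the Claim_ definition above) =====
set_option maxHeartbeats 2000000 in
theorem get_timebase_chan_bytes_py_spec : Claim_equal_get_timebase_chan_bytes_py := by
  intro timebase _
  unfold Spec_get_timebase_chan_bytes_py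
  by_cases hin : 0 ≤ timebase ∧ timebase ≤ 10
  · obtain ⟨h1, h2⟩ := hin
    interval_cases timebase <;> decide
  · have hout : timebase < 0 ∨ 10 < timebase := by omega
    unfold get_timebase_chan_bytes_py get_timebase_chan_bytes_py_alt
    rw [pv_get?_none timebase hout]
    simp only [if_neg hin]
    rcases hout with hneg | hbig
    · rw [if_neg (by omega), if_neg (by omega)]
      decide
    · rw [if_pos (by omega), if_pos (by omega)]
      have hlen : (PySem.List.pyRange 0 (timebase - 10) 1).length = (timebase - 10).toNat := by
        rw [PySem.List.length_pyRange_one]; norm_num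
      rw [pv_foldl_const (fun v => max (PySem.Int.floordiv v 2) 1), hlen,
        pv_iter_closed _ 40 (by norm_num)]
      apply pv_split_small
      · have := Int.le_max_right ((40:Int) >>> (timebase - 10).toNat) 1; omega
      · have h1 : (40:Int) >>> (timebase - 10).toNat ≤ 40 := by
          rw [Int.shiftRight_eq_div_pow]
          have : (1:Int) ≤ 2 ^ (timebase - 10).toNat := one_le_pow₀ (by norm_num)
          exact le_trans (Int.ediv_le_self _ (by norm_num)) (by norm_num)
        omega
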